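-- pv_equiv track=rewrite | github.com/Kawser-nerd/CLCDSA | Source Codes/AtCoder/arc036/A/4185816.py | a_good_sleep
-- ===== SOURCE A (Python) =====
-- def a_good_sleep(N, K, T):
--     sleep_time = sum(T[:3])
--     if sleep_time < K:
--         return 3
--
--     ans = -1
--     for day, t in enumerate(T[3:], 4):
--         sleep_time -= T[day - 3 - 1]
--         sleep_time += T[day - 1]
--         if sleep_time < K:
--             ans = day
--             break
--     return ans
-- ===== SOURCE B (Python) =====
-- def a_good_sleep(N, K, T):
--     # Recompute each 3-day window sum directly instead of maintaining a running sum.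
--     for i in range(max(1, len(T) - 2)):
--         if sum(T[i:i + 3]) < K:
--             return i + 3
--     return -1
-- ===== Notes on version B (the rewrite author's own statement) =====
-- stated objective: simpler
-- what changed: Replaces the incremental sliding-window running sum (seed sum plus per-step subtract/add of boundary elements) with a plain scan over window start indices that recomputes each 3-element window sum from a slice.
import Mathlib
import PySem

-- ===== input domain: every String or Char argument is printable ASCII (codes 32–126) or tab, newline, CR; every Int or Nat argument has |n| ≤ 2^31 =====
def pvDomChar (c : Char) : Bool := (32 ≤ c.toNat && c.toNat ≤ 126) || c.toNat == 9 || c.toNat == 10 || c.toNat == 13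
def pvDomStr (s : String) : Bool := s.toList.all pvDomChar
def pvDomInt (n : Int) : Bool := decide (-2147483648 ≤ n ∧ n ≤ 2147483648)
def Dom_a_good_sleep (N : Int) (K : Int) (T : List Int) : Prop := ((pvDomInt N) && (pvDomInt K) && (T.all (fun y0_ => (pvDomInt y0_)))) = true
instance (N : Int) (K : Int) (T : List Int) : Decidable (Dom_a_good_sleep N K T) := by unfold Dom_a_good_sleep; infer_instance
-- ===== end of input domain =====

-- B replaces A's incrementally maintained running window sum by a direct scan that
-- recomputes each 3-day window sum from a slice (objective: simpler).

-- ===== PORT A =====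
-- A's loop: for day, t in enumerate(T[3:], 4): update running sum, break on success.
def aGoodSleepLoop (T : List Int) (K : Int) : List Int → Int → Int → Int
  | [], _, _ => -1
  | _ :: tl, day, sleep =>
      let s := sleep - PySem.List.pyGetD T (day - 3 - 1) 0 + PySem.List.pyGetD T (day - 1) 0
      if s < K then day else aGoodSleepLoop T K tl (day + 1) s

def a_good_sleep (N : Int) (K : Int) (T : List Int) : Int :=
  let sleep_time := (PySem.List.slice T none (some 3)).sum
  if sleep_time < K then 3
  else aGoodSleepLoop T K (PySem.List.slice T (some 3) none) 4 sleep_time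

-- ===== PORT B =====
-- B's loop: for i in range(max(1, len(T)-2)): return i+3 on the first window with sum(T[i:i+3]) < K.
def aGoodSleepScan (K : Int) (T : List Int) : List Int → Int
  | [] => -1
  | i :: rest =>
      if (PySem.List.slice T (some i) (some (i + 3))).sum < K then i + 3
      else aGoodSleepScan K T rest

def a_good_sleep_alt (N : Int) (K : Int) (T : List Int) : Int :=
  aGoodSleepScan K T (PySem.List.pyRange 0 (max 1 ((T.length : Int) - 2)) 1)

-- ===== PRECONDITION & SPEC =====
def Spec_a_good_sleep (N : Int) (K : Int) (T : List Int) (out : Int) : Prop := out = a_good_sleep_alt N K T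
instance (N : Int) (K : Int) (T : List Int) (out : Int) : Decidable (Spec_a_good_sleep N K T out) := by unfold Spec_a_good_sleep; infer_instance

-- ===== CLAIM (what is proved, stated in full; the proofs are below) =====
def Claim_equal_a_good_sleep : Prop := ∀ (N : Int) (K : Int) (T : List Int), Dom_a_good_sleep N K T → Spec_a_good_sleep N K T (a_good_sleep N K T)

-- ===== LEMMAS AND PROOFS =====

-- sliding one step: subtract the leaving element, add the entering one
lemma window_step (T : List Int) (j : Nat) (h : j + 3 < T.length) :
    ((T.drop j).take 3).sum - T[j] + T[j + 3] = ((T.drop (j + 1)).take 3).sum := by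
  have h1 : T.drop j = T[j] :: T.drop (j + 1) := List.drop_eq_getElem_cons (by omega)
  have h2 : T.drop (j + 1) = T[j + 1] :: T.drop (j + 2) := List.drop_eq_getElem_cons (by omega)
  have h3 : T.drop (j + 2) = T[j + 2] :: T.drop (j + 3) := List.drop_eq_getElem_cons (by omega)
  have h4 : T.drop (j + 3) = T[j + 3] :: T.drop (j + 4) := List.drop_eq_getElem_cons (by omega)
  have tk : ∀ (a b c : ℤ) (l : List ℤ), List.take 3 (a :: b :: c :: l) = [a, b, c] :=
    fun _ _ _ _ => rfl
  rw [h1, h2, h3, h4, tk, tk]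
  simp only [List.sum_cons, List.sum_nil]
  ring

-- B's slice-sum over a window is the drop/take window sum
lemma slice_window (T : List Int) (j : Nat) :
    (PySem.List.slice T (some (j : Int)) (some ((j : Int) + 3))).sum = ((T.drop j).take 3).sum := by
  have : ((j : Int) + 3) = ((j : Int) + ((3 : Nat) : Int)) := by norm_num
  rw [this, PySem.List.slice_natCast_add]

-- main correspondence between A's incremental loop and B's scan, for len T ≥ 3
lemma loop_eq_scan (T : List Int) (K : Int) :
    ∀ (L : List Int) (j : Nat), L = T.drop (3 + j) →
      aGoodSleepLoop T K L (4 + (j : Int)) ((T.drop j).take 3).sum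
        = aGoodSleepScan K T (PySem.List.pyRange (1 + (j : Int)) ((T.length : Int) - 2) 1) := by
  intro L
  induction L with
  | nil =>
      intro j hL
      have hlen : T.length ≤ 3 + j := by
        have := congrArg List.length hL
        simp [List.length_drop] at this
        omega
      rw [PySem.List.pyRange_one_eq_nil (by omega)]
      simp [aGoodSleepLoop, aGoodSleepScan]
  | cons x tl ih =>
      intro j hL
      have hlen : 3 + j < T.length := by
        have := congrArg List.length hL
        simp [List.length_drop] at this
        omega
      have hdrop : T.drop (3 + j) = T[3 + j] :: T.drop (3 + j + 1) :=
        List.drop_eq_getElem_cons (by omega)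
      have htl : tl = T.drop (3 + (j + 1)) := by
        rw [hdrop] at hL
        have := (List.cons.injEq _ _ _ _).mp hL
        rw [this.2]; congr 1
      -- unfold one step of A's loop
      rw [aGoodSleepLoop]
      have e1 : (4 + (j : Int) - 3 - 1) = ((j : Nat) : Int) := by ring
      have e2 : (4 + (j : Int) - 1) = (((j + 3 : Nat)) : Int) := by push_cast; ring
      rw [e1, e2, PySem.List.pyGetD_natCast, PySem.List.pyGetD_natCast,
        List.getD_eq_getElem T 0 (show j < T.length by omega),
        List.getD_eq_getElem T 0 (show j + 3 < T.length by omega),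
        window_step T j (by omega)]
      -- unfold one step of B's scan
      rw [PySem.List.pyRange_one_cons (by omega)]
      rw [aGoodSleepScan]
      have e3 : (1 + (j : Int)) = (((j + 1 : Nat)) : Int) := by push_cast; ring
      rw [e3, slice_window T (j + 1)]
      by_cases hlt : ((T.drop (j + 1)).take 3).sum < K
      · simp [hlt]; push_cast; ring
      · simp only [hlt, if_false]
        have := ih (j + 1) htl
        have e4 : (4 + (j : Int) + 1) = (4 + ((j + 1 : Nat) : Int)) := by push_cast; ring
        have e5 : (((j + 1 : Nat)) : Int) + 1 = 1 + ((j + 1 : Nat) : Int) := by ring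
        rw [e4, e5, this]

-- ===== VERDICT (by name: the statement is the Claim_ definition above) =====
theorem a_good_sleep_spec : Claim_equal_a_good_sleep := by
  intro N K T _
  unfold Spec_a_good_sleep a_good_sleep a_good_sleep_alt
  have hfirst : (PySem.List.slice T none (some 3)).sum = ((T.drop 0).take 3).sum := by
    rw [PySem.List.slice_to (xs := T) (b := 3) (by norm_num)]
    rfl
  have hb : max 1 ((T.length : Int) - 2) = if T.length ≤ 3 then 1 else (T.length : Int) - 2 := by
    split <;> omega
  have hcons : PySem.List.pyRange 0 (max 1 ((T.length : Int) - 2)) 1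
      = 0 :: PySem.List.pyRange 1 (max 1 ((T.length : Int) - 2)) 1 :=
    PySem.List.pyRange_one_cons (by omega)
  rw [hcons, aGoodSleepScan]
  have h0 : (PySem.List.slice T (some (0 : Int)) (some ((0 : Int) + 3))).sum = ((T.drop 0).take 3).sum := by
    have := slice_window T 0
    simpa using this
  rw [show ((0 : Int) + 3) = (0 : Int) + 3 from rfl] at h0
  by_cases hlt : ((T.drop 0).take 3).sum < K
  · rw [hfirst, if_pos hlt, h0, if_pos hlt]
    norm_num
  · rw [hfirst, if_neg hlt, h0, if_neg hlt]
    by_cases hn : 3 ≤ T.length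
    · have hmax : max 1 ((T.length : Int) - 2) = (T.length : Int) - 2 := by omega
      rw [hmax]
      have hdrop3 : PySem.List.slice T (some 3) none = T.drop 3 := by
        rw [PySem.List.slice_from (xs := T) (a := 3) (by norm_num)]; rfl
      rw [hdrop3]
      have := loop_eq_scan T K (T.drop 3) 0 (by norm_num)
      simpa using this
    · have hmax : max 1 ((T.length : Int) - 2) = 1 := by omega
      rw [hmax, PySem.List.pyRange_one_eq_nil (by norm_num)]
      have hdrop3 : PySem.List.slice T (some 3) none = T.drop 3 := by
        rw [PySem.List.slice_from (xs := T) (a := 3) (by norm_num)]; rfl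
      have : T.drop 3 = [] := List.drop_eq_nil_of_le (by omega)
      rw [hdrop3, this]
      simp [aGoodSleepLoop, aGoodSleepScan]
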